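-- pv_equiv track=rewrite | github.com/masseypaul/numberlinkSolver | cellResolution/numberlinkSolver.py | find_pos_on_bridges
-- ===== SOURCE A (Python) =====
-- def find_pos_on_bridges(answer_formatted, bridges):
--     posBridgeDict = dict()
--     for bridge in bridges:
--         for key in answer_formatted:
--             if bridge in answer_formatted[key]:
--                 if bridge not in posBridgeDict:
--                     posBridgeDict[bridge] = []
--                 posBridgeDict[bridge].append(key)
--     return posBridgeDict
-- ===== SOURCE B (Python) =====
-- def find_pos_on_bridges(answer_formatted, bridges):
--     # One pass over answer_formatted builds an inverted index element -> keys,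
--     # then each bridge is answered by a single dict lookup.
--     index = {}
--     for key, lst in answer_formatted.items():
--         for e in dict.fromkeys(lst):
--             index.setdefault(e, []).append(key)
--     result = {}
--     for bridge in bridges:
--         keys = index.get(bridge)
--         if keys is not None:
--             result.setdefault(bridge, []).extend(keys)
--     return result
-- ===== Notes on version B (the rewrite author's own statement) =====
-- stated objective: faster
-- what changed: Instead of scanning every answer list for every bridge, B builds an inverted index (element -> keys) in one pass over answer_formatted and answers each bridge with a single dict lookup.
import Mathlib
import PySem

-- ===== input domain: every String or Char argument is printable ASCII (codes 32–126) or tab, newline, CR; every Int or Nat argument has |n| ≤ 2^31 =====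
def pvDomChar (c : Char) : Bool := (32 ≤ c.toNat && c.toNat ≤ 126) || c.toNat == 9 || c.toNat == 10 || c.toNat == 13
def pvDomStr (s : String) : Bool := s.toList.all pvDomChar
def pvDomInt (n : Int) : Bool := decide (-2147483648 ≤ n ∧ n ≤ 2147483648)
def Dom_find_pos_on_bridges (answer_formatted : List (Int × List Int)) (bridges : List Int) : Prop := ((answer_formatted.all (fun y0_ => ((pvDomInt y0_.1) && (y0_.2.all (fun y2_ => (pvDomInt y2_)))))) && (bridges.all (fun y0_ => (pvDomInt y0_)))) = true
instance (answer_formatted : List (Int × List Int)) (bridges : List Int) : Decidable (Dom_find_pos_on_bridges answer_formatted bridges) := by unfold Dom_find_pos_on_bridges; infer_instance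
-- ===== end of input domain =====

-- B replaces A's per-bridge scan of every answer list by an inverted index built in one
-- pass over answer_formatted, so each bridge is answered by a single dict lookup (faster).

-- ===== PORT A =====
-- for bridge in bridges: for key in answer_formatted: if bridge in answer_formatted[key]: …append(key)
def find_pos_on_bridges (answer_formatted : List (Int × List Int)) (bridges : List Int) : List (Int × List Int) :=
  let d := PySem.Dict.ofList answer_formatted
  (bridges.foldl (fun acc bridge =>
      d.keys.foldl (fun acc2 key =>
        if bridge ∈ d.getD key [] then
          (if acc2.contains bridge then acc2 else acc2.insert bridge []).modify bridge [] (· ++ [key])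
        else acc2) acc)
    PySem.Dict.empty).items

-- ===== PORT B =====
-- index = {}; for key, lst in answer_formatted.items(): for e in dict.fromkeys(lst): index.setdefault(e, []).append(key)
-- result = {}; for bridge in bridges: keys = index.get(bridge); if keys is not None: result.setdefault(bridge, []).extend(keys)
def find_pos_on_bridges_alt (answer_formatted : List (Int × List Int)) (bridges : List Int) : List (Int × List Int) :=
  let d := PySem.Dict.ofList answer_formatted
  let index := d.items.foldl (fun idx p =>
      (PySem.List.dedup p.2).foldl (fun idx2 e => (idx2.setdefault e []).modify e [] (· ++ [p.1])) idx)
    PySem.Dict.empty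
  (bridges.foldl (fun res bridge =>
      match index.get? bridge with
      | none => res
      | some keys => (res.setdefault bridge []).modify bridge [] (· ++ keys))
    PySem.Dict.empty).items

-- ===== PRECONDITION & SPEC =====
def Spec_find_pos_on_bridges (answer_formatted : List (Int × List Int)) (bridges : List Int) (out : List (Int × List Int)) : Prop := out = find_pos_on_bridges_alt answer_formatted bridges
instance (answer_formatted : List (Int × List Int)) (bridges : List Int) (out : List (Int × List Int)) : Decidable (Spec_find_pos_on_bridges answer_formatted bridges out) := by unfold Spec_find_pos_on_bridges; infer_instance

-- ===== CLAIM (what is proved, stated in full; the proofs are below) =====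
def Claim_equal_find_pos_on_bridges : Prop := ∀ (answer_formatted : List (Int × List Int)) (bridges : List Int), Dom_find_pos_on_bridges answer_formatted bridges → Spec_find_pos_on_bridges answer_formatted bridges (find_pos_on_bridges answer_formatted bridges)

-- ===== LEMMAS AND PROOFS =====

-- keys (in d.items order) of the entries whose list contains b
def pvOcc (its : List (Int × List Int)) (b : Int) : List Int :=
  (its.filter (fun p => decide (b ∈ p.2))).map (·.1)

-- the common outer-loop step both ports reduce to
def pvCanon (its : List (Int × List Int)) (acc : PySem.Dict Int (List Int)) (b : Int) : PySem.Dict Int (List Int) :=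
  if pvOcc its b = [] then acc
  else (if acc.contains b then acc else acc.insert b []).modify b [] (· ++ pvOcc its b)

theorem pvA_inner (b : Int) (v : Int → List Int) (ks : List Int) (acc : PySem.Dict Int (List Int)) :
    ks.foldl (fun acc2 k =>
        if b ∈ v k then
          (if acc2.contains b then acc2 else acc2.insert b []).modify b [] (· ++ [k])
        else acc2) acc
    = (if ks.filter (fun k => decide (b ∈ v k)) = [] then acc
       else (if acc.contains b then acc else acc.insert b []).modify b [] (· ++ ks.filter (fun k => decide (b ∈ v k)))) := by
  induction ks generalizing acc with
  | nil => simp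
  | cons k ks ih =>
    by_cases hk : b ∈ v k
    · simp only [List.foldl_cons, List.filter_cons, hk, if_pos, decide_true]
      rw [ih]
      set C := (if acc.contains b then acc else acc.insert b []) with hC
      simp only [PySem.Dict.modify, PySem.Dict.insert_insert_self]
      by_cases hf : ks.filter (fun k => decide (b ∈ v k)) = [] <;>
        simp [hf, PySem.Dict.insert_insert_self]
    · simp only [List.foldl_cons, List.filter_cons, hk, decide_false]
      simpa using ih acc

theorem pvB_inner (b k : Int) (es : List Int) (hnd : es.Nodup) (idx : PySem.Dict Int (List Int)) :
    (es.foldl (fun i e => (i.setdefault e []).modify e [] (· ++ [k])) idx).get? b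
    = if b ∈ es then some (idx.getD b [] ++ [k]) else idx.get? b := by
  induction es generalizing idx with
  | nil => simp
  | cons e es ih =>
    obtain ⟨hne, hnd'⟩ := List.nodup_cons.mp hnd
    simp only [List.foldl_cons]
    rw [ih hnd']
    by_cases hbe : b = e
    · subst hbe
      rw [if_neg hne, if_pos (by simp : b ∈ b :: es)]
      simp [PySem.Dict.modify, PySem.Dict.get?_setdefault_self, PySem.Dict.getD_eq_get?_getD]
    · have hget : ((idx.setdefault e []).modify e [] (· ++ [k])).get? b = idx.get? b := by
        rw [PySem.Dict.modify]
        rw [PySem.Dict.get?_insert_of_ne _ _ hbe]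
        by_cases hc : idx.contains e = true
        · rw [PySem.Dict.setdefault_of_contains _ _ hc]
        · rw [PySem.Dict.setdefault_of_not_contains _ _ (by simpa using hc),
            PySem.Dict.get?_insert_of_ne _ _ hbe]
      have hgetD : ((idx.setdefault e []).modify e [] (· ++ [k])).getD b [] = idx.getD b [] := by
        rw [PySem.Dict.getD_eq_get?_getD, hget, ← PySem.Dict.getD_eq_get?_getD]
      simp only [hget, hgetD, List.mem_cons, hbe, false_or]

theorem pvB_index (b : Int) (its : List (Int × List Int)) (idx : PySem.Dict Int (List Int)) :
    (its.foldl (fun i p =>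
        (PySem.List.dedup p.2).foldl (fun i2 e => (i2.setdefault e []).modify e [] (· ++ [p.1])) i) idx).get? b
    = if pvOcc its b = [] then idx.get? b else some (idx.getD b [] ++ pvOcc its b) := by
  induction its generalizing idx with
  | nil => simp [pvOcc]
  | cons p its ih =>
    simp only [List.foldl_cons]
    rw [ih]
    have hinner := pvB_inner b p.1 (PySem.List.dedup p.2) (PySem.List.nodup_dedup p.2) idx
    by_cases hp : b ∈ p.2
    · have hmem : b ∈ PySem.List.dedup p.2 := (PySem.List.mem_dedup p.2 b).mpr hp
      rw [if_pos hmem] at hinner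
      have hD : ((PySem.List.dedup p.2).foldl (fun i2 e => (i2.setdefault e []).modify e [] (· ++ [p.1])) idx).getD b []
          = idx.getD b [] ++ [p.1] := by
        rw [PySem.Dict.getD_eq_get?_getD, hinner]; rfl
      have hocc : pvOcc (p :: its) b = p.1 :: pvOcc its b := by
        simp [pvOcc, hp]
      rw [hocc, hinner, hD]
      by_cases hf : pvOcc its b = []
      · rw [if_pos hf, if_neg (by simp)]
        simp [hf]
      · rw [if_neg hf, if_neg (by simp)]
        simp
    · have hmem : b ∉ PySem.List.dedup p.2 := fun h => hp ((PySem.List.mem_dedup p.2 b).mp h)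
      rw [if_neg hmem] at hinner
      have hD : ((PySem.List.dedup p.2).foldl (fun i2 e => (i2.setdefault e []).modify e [] (· ++ [p.1])) idx).getD b []
          = idx.getD b [] := by
        rw [PySem.Dict.getD_eq_get?_getD, hinner, ← PySem.Dict.getD_eq_get?_getD]
      have hocc : pvOcc (p :: its) b = pvOcc its b := by
        simp [pvOcc, hp]
      rw [hocc, hinner, hD]

theorem pvKeysFilter (d : PySem.Dict Int (List Int)) (hnd : d.keys.Nodup) (b : Int) :
    d.keys.filter (fun k => decide (b ∈ d.getD k [])) = pvOcc d.items b := by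
  unfold pvOcc
  have h1 : d.keys = d.items.map (·.1) := rfl
  rw [h1, List.filter_map]
  refine congrArg _ (List.filter_congr ?_)
  intro p hp
  simp only [Function.comp]
  rw [PySem.Dict.getD_of_mem_items d (k := p.1) (v := p.2) (by simpa using hp) hnd]

theorem pvStepA (d : PySem.Dict Int (List Int)) (hnd : d.keys.Nodup) (acc : PySem.Dict Int (List Int)) (b : Int) :
    d.keys.foldl (fun acc2 key =>
        if b ∈ d.getD key [] then
          (if acc2.contains b then acc2 else acc2.insert b []).modify b [] (· ++ [key])
        else acc2) acc
    = pvCanon d.items acc b := by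
  rw [pvA_inner b (fun k => d.getD k []) d.keys acc, pvCanon, pvKeysFilter d hnd b]

theorem pvStepB (d : PySem.Dict Int (List Int)) (acc : PySem.Dict Int (List Int)) (b : Int) :
    (match (d.items.foldl (fun idx p =>
        (PySem.List.dedup p.2).foldl (fun idx2 e => (idx2.setdefault e []).modify e [] (· ++ [p.1])) idx)
      PySem.Dict.empty).get? b with
      | none => acc
      | some keys => (acc.setdefault b []).modify b [] (· ++ keys))
    = pvCanon d.items acc b := by
  rw [pvB_index b d.items PySem.Dict.empty]
  by_cases hf : pvOcc d.items b = []
  · simp [hf, pvCanon]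
  · rw [if_neg hf]
    dsimp only
    simp only [PySem.Dict.getD_empty, List.nil_append]
    unfold pvCanon
    rw [if_neg hf]
    by_cases hc : acc.contains b = true
    · rw [PySem.Dict.setdefault_of_contains _ _ hc, if_pos hc]
    · rw [PySem.Dict.setdefault_of_not_contains _ _ (by simpa using hc), if_neg hc]

-- ===== VERDICT (by name: the statement is the Claim_ definition above) =====
theorem find_pos_on_bridges_spec : Claim_equal_find_pos_on_bridges := by
  intro af bridges _
  unfold Spec_find_pos_on_bridges
  show (bridges.foldl (fun acc bridge =>
      (PySem.Dict.ofList af).keys.foldl (fun acc2 key =>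
        if bridge ∈ (PySem.Dict.ofList af).getD key [] then
          (if acc2.contains bridge then acc2 else acc2.insert bridge []).modify bridge [] (· ++ [key])
        else acc2) acc) PySem.Dict.empty).items
    = (bridges.foldl (fun res bridge =>
      match ((PySem.Dict.ofList af).items.foldl (fun idx p =>
          (PySem.List.dedup p.2).foldl (fun idx2 e => (idx2.setdefault e []).modify e [] (· ++ [p.1])) idx)
        PySem.Dict.empty).get? bridge with
      | none => res
      | some keys => (res.setdefault bridge []).modify bridge [] (· ++ keys)) PySem.Dict.empty).items
  have hnd := PySem.Dict.nodup_keys_ofList af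
  congr 1
  rw [List.foldl_ext _ (pvCanon (PySem.Dict.ofList af).items) _ (fun acc b _ => pvStepA _ hnd acc b),
      List.foldl_ext _ (pvCanon (PySem.Dict.ofList af).items) _ (fun acc b _ => pvStepB _ acc b)]
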